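-- pv_equiv track=rewrite | github.com/AtlasArcadia/SIA_DSO_II | AisRobotBuffet/Library/General/atlasConvertHtmlToXlsx/ConvertHtmlToXlsx.py | get_dict_array_from_text
-- ===== SOURCE A (Python) =====
-- def get_dict_array_from_text(text):
--     lists = []
--     bracket_dict = False
--     var = ""
--     for arr in text[1:-1]:
--         if arr == '{':
--             bracket_dict = True
--         if arr == "}":
--             bracket_dict = False
--
--         if bracket_dict:
--             var += arr
--         else:
--             if len(var) != 0:
--                 lists.append(var[1:])
--                 var = ""
--     return lists
-- ===== SOURCE B (Python) =====
-- def get_dict_array_from_text(text):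
--     lists = []
--     rest = text[1:-1]
--     while True:
--         _, found, rest = rest.partition('{')
--         if not found:
--             return lists
--         content, found, rest = rest.partition('}')
--         if not found:
--             return lists
--         lists.append(content)
-- ===== Notes on version B (the rewrite author's own statement) =====
-- stated objective: idiomatic
-- what changed: Replaces the per-character boolean state machine with a delimiter-jumping loop using str.partition: cut at the next opening brace, then at the next closing brace, emit the piece between, repeat.
import Mathlib
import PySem

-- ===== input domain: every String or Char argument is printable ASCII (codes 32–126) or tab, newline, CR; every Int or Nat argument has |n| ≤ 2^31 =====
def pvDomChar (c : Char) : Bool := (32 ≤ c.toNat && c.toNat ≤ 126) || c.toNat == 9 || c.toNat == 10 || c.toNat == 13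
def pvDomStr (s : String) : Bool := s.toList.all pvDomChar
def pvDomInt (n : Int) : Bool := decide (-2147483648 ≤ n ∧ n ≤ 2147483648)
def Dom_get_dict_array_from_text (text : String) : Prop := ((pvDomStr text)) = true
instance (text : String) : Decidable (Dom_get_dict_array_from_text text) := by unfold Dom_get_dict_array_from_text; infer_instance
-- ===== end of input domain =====

-- B replaces A's per-character boolean state machine with a delimiter-jumping
-- loop built on str.partition (idiomatic; C-level scans gave a measured constant-factor speedup).

-- ===== PORT A =====
-- loop body of A; state = (lists, bracket_dict, var); var kept as List Char (a Python str)
def pvAStep (st : List String × Bool × List Char) (arr : Char) : List String × Bool × List Char :=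
  let bd1 := if arr = '{' then true else st.2.1
  let bd2 := if arr = '}' then false else bd1
  if bd2 then (st.1, bd2, st.2.2 ++ [arr])
  else if st.2.2.length ≠ 0 then
    -- lists.append(var[1:]); var = ""
    (st.1 ++ [String.ofList (PySem.List.slice st.2.2 (some 1) none)], bd2, [])
  else (st.1, bd2, st.2.2)

def get_dict_array_from_text (text : String) : List String :=
  ((PySem.List.slice text.toList (some 1) (some (-1))).foldl pvAStep ([], false, ([] : List Char))).1

-- ===== PORT B =====
-- s.partition(d), ported by hand on List Char (exact: (part before first d, found?, part after first d);
-- Python returns (s, '', '') when d does not occur — B's loop never uses the 'before' part in that case)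
def pvPartition (cs : List Char) (d : Char) : List Char × Bool × List Char :=
  match cs.dropWhile (· ≠ d) with
  | [] => (cs, false, [])
  | _ :: rest => (cs.takeWhile (· ≠ d), true, rest)

-- termination helper for B's while-loop recursion (cited in decreasing_by)
theorem pvPartition_length_lt (cs : List Char) (d : Char) (b : List Char) (r : List Char)
    (h : pvPartition cs d = (b, true, r)) : r.length < cs.length := by
  unfold pvPartition at h
  cases hd : cs.dropWhile (· ≠ d) with
  | nil => rw [hd] at h; simp at h
  | cons x rest =>
    rw [hd] at h
    simp only [Prod.mk.injEq] at h
    obtain ⟨-, -, hr⟩ := h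
    subst hr
    have hle := List.length_dropWhile_le (· ≠ d) cs
    rw [hd] at hle
    simp at hle; omega

-- the while-loop of B: cut at the next '{', then at the next '}', emit the piece between, repeat
def pvScan (cs : List Char) : List String :=
  match h1 : pvPartition cs '{' with
  | (_, false, _) => []
  | (_, true, r1) =>
    match h2 : pvPartition r1 '}' with
    | (_, false, _) => []
    | (content, true, r2) => String.ofList content :: pvScan r2
termination_by cs.length
decreasing_by
  have a1 := pvPartition_length_lt cs '{' _ _ h1
  have a2 := pvPartition_length_lt r1 '}' _ _ h2
  omega

def get_dict_array_from_text_alt (text : String) : List String :=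
  pvScan (PySem.List.slice text.toList (some 1) (some (-1)))

-- ===== PRECONDITION & SPEC =====
def Spec_get_dict_array_from_text (text : String) (out : List String) : Prop := out = get_dict_array_from_text_alt text
instance (text : String) (out : List String) : Decidable (Spec_get_dict_array_from_text text out) := by unfold Spec_get_dict_array_from_text; infer_instance

-- ===== CLAIM (what is proved, stated in full; the proofs are below) =====
def Claim_equal_get_dict_array_from_text : Prop := ∀ (text : String), Dom_get_dict_array_from_text text → Spec_get_dict_array_from_text text (get_dict_array_from_text text)

-- ===== LEMMAS AND PROOFS =====

theorem pvScan_nil : pvScan [] = [] := by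
  rw [pvScan]; rfl

theorem pvPartition_cons_ne (c d : Char) (cs : List Char) (hc : c ≠ d) :
    pvPartition (c :: cs) d = (c :: (pvPartition cs d).1, (pvPartition cs d).2.1, (pvPartition cs d).2.2) := by
  unfold pvPartition
  rw [show List.dropWhile (fun x => decide (x ≠ d)) (c :: cs) = List.dropWhile (fun x => decide (x ≠ d)) cs from by
        rw [List.dropWhile_cons]; simp [hc],
      show List.takeWhile (fun x => decide (x ≠ d)) (c :: cs) = c :: List.takeWhile (fun x => decide (x ≠ d)) cs from by
        rw [List.takeWhile_cons]; simp [hc]]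
  cases hd : cs.dropWhile (· ≠ d) <;> rfl

theorem pvScan_cons_ne (c : Char) (cs : List Char) (hc : c ≠ '{') :
    pvScan (c :: cs) = pvScan cs := by
  rw [pvScan, pvScan, pvPartition_cons_ne c '{' cs hc]
  cases h : pvPartition cs '{' with
  | mk b p =>
    cases p with
    | mk f r => cases f <;> rfl

theorem pvScan_cons_open (cs : List Char) :
    pvScan ('{' :: cs) =
      match cs.dropWhile (· ≠ '}') with
      | [] => []
      | _ :: tail => String.ofList (cs.takeWhile (· ≠ '}')) :: pvScan tail := by
  have hopen : pvPartition ('{' :: cs) '{' = ([], true, cs) := by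
    unfold pvPartition
    rw [show List.dropWhile (fun x => decide (x ≠ '{')) ('{' :: cs) = '{' :: cs from by
          rw [List.dropWhile_cons]; simp]
    simp
  rw [pvScan, hopen]
  show (match h2 : pvPartition cs '}' with
    | (_, false, _) => []
    | (content, true, r2) => String.ofList content :: pvScan r2) = _
  unfold pvPartition
  cases hd : cs.dropWhile (· ≠ '}') <;> rfl

-- the joint invariant of A's fold: outside a brace it computes pvScan of the remainder;
-- inside one (var = '{' :: v), it finishes the pending item at the next '}' and continues
theorem pvMain (n : Nat) : ∀ cs : List Char, cs.length ≤ n →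
    (∀ acc : List String,
      (cs.foldl pvAStep (acc, false, ([] : List Char))).1 = acc ++ pvScan cs)
  ∧ (∀ (acc : List String) (v : List Char),
      (cs.foldl pvAStep (acc, true, '{' :: v)).1 =
        match cs.dropWhile (· ≠ '}') with
        | [] => acc
        | _ :: tail => acc ++ (String.ofList (v ++ cs.takeWhile (· ≠ '}')) :: pvScan tail)) := by
  induction n with
  | zero =>
    intro cs hlen
    have : cs = [] := List.length_eq_zero_iff.mp (Nat.le_zero.mp hlen)
    subst this
    exact ⟨fun acc => by simp [pvScan_nil], fun acc v => by simp⟩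
  | succ m ih =>
    intro cs hlen
    cases cs with
    | nil => exact ⟨fun acc => by simp [pvScan_nil], fun acc v => by simp⟩
    | cons c rest =>
      have hrest : rest.length ≤ m := by simp at hlen; omega
      constructor
      · intro acc
        by_cases hc : c = '{'
        · subst hc
          simp only [List.foldl_cons]
          have hstep : pvAStep (acc, false, ([] : List Char)) '{' = (acc, true, ['{']) := by
            simp [pvAStep]
          rw [hstep, (ih rest hrest).2 acc [], pvScan_cons_open]
          cases hd : rest.dropWhile (· ≠ '}') <;> simp [hd]
        · simp only [List.foldl_cons]
          have hstep : pvAStep (acc, false, ([] : List Char)) c = (acc, false, []) := by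
            by_cases hc2 : c = '}' <;> simp [pvAStep, hc, hc2]
          rw [hstep, (ih rest hrest).1 acc, pvScan_cons_ne c rest hc]
      · intro acc v
        by_cases hc : c = '}'
        · subst hc
          simp only [List.foldl_cons]
          have hstep : pvAStep (acc, true, '{' :: v) '}' = (acc ++ [String.ofList v], false, []) := by
            simp [pvAStep, PySem.List.slice_from_one]
          rw [hstep, (ih rest hrest).1 (acc ++ [String.ofList v])]
          rw [show List.dropWhile (fun x => decide (x ≠ '}')) ('}' :: rest) = '}' :: rest from by
                rw [List.dropWhile_cons]; simp]
          simp
        · simp only [List.foldl_cons]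
          have hstep : pvAStep (acc, true, '{' :: v) c = (acc, true, '{' :: (v ++ [c])) := by
            by_cases hc1 : c = '{' <;> simp [pvAStep, hc, hc1]
          rw [hstep, (ih rest hrest).2 acc (v ++ [c])]
          rw [show List.dropWhile (fun x => decide (x ≠ '}')) (c :: rest) = List.dropWhile (fun x => decide (x ≠ '}')) rest from by
                rw [List.dropWhile_cons]; simp [hc],
              show List.takeWhile (fun x => decide (x ≠ '}')) (c :: rest) = c :: List.takeWhile (fun x => decide (x ≠ '}')) rest from by
                rw [List.takeWhile_cons]; simp [hc]]
          cases hd : rest.dropWhile (· ≠ '}') <;> simp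

-- ===== VERDICT (by name: the statement is the Claim_ definition above) =====
theorem get_dict_array_from_text_spec : Claim_equal_get_dict_array_from_text := by
  intro text _
  unfold Spec_get_dict_array_from_text get_dict_array_from_text get_dict_array_from_text_alt
  exact (pvMain _ _ le_rfl).1 []
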